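-- pv_equiv track=rewrite | github.com/OFCIHLAVA/SQLite | Programy/5_SFExBFExMIX/Modules/sqllite.py | get_pn_in_monuments
-- ===== SOURCE A (Python) =====
-- def get_pn_in_monuments(data=list): # Takes list of lines of monument BOM and costructs a list of unique monument: PN pairs. Return list of all unique PNs and their final monumnet.p1:m1, p2:m1, p1:m2, p2:m2 ...
--
--     # list of tuples all pns with its monuments
--     all_pn = list()
--
--     for line in data:
--         # Set final m and its BOM
--         final_monument = line[0]
--         monument_bom = line[1:]
--
--         for pn in monument_bom:
--             if (pn, final_monument) not in all_pn:
--                 all_pn.append((pn, final_monument))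
--     return all_pn
-- ===== SOURCE B (Python) =====
-- def get_pn_in_monuments(data=list):
--     # Sieve-style dedup: flatten to the pair stream, then repeatedly take the
--     # first remaining pair and purge all its later duplicates from the stream.
--     rest = [(pn, line[0]) for line in data for pn in line[1:]]
--     out = []
--     while rest:
--         head = rest[0]
--         out.append(head)
--         rest = [p for p in rest[1:] if p != head]
--     return out
-- ===== Notes on version B (the rewrite author's own statement) =====
-- stated objective: alternative
-- what changed: Replaced A's nested loop with a 'not in' membership test against the growing output by a two-stage sieve: flatten all (pn, monument) pairs into one stream, then repeatedly emit the head and filter all its duplicates out of the remaining stream (no membership test against the output at all).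
import Mathlib
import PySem

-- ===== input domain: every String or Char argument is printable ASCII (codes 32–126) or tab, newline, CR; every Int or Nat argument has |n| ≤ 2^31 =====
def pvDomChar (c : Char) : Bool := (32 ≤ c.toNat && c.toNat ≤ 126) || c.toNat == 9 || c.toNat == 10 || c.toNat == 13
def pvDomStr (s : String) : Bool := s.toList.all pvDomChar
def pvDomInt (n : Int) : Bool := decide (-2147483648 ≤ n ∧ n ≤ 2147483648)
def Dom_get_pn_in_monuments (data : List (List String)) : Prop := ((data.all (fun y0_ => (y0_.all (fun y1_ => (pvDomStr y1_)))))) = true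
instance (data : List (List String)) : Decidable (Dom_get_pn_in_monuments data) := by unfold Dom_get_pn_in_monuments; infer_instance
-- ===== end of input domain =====

-- B replaces A's membership-tested accumulation by a two-stage sieve: flatten all
-- (pn, monument) pairs, then repeatedly emit the head and purge its duplicates from
-- the remaining stream; objective: alternative decomposition, same cost.


-- ===== PORT A =====
-- 'line[0]' raises IndexError on an empty line; those inputs are outside Pre_ (pyGet? is none there,
-- ported with getD "" which is never reached inside Pre_).
def get_pn_in_monuments (data : List (List String)) : List (String × String) :=
  data.foldl (fun all_pn line =>
    let final_monument := (PySem.List.pyGet? line 0).getD ""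
    let monument_bom := PySem.List.slice line (some 1) none
    monument_bom.foldl (fun acc pn =>
      if (pn, final_monument) ∈ acc then acc else acc ++ [(pn, final_monument)]) all_pn) []

-- ===== PORT B =====
-- The while-loop of Source B: emit the head, drop its duplicates from the rest, repeat.
def pvSieve : List (String × String) → List (String × String)
  | [] => []
  | h :: t => h :: pvSieve (t.filter (fun p => p ≠ h))
termination_by xs => xs.length
decreasing_by
  simp only [List.length_cons, List.length_unattach, Nat.lt_succ_iff]
  exact le_trans (List.length_filter_le _ _) (by simp)

def get_pn_in_monuments_alt (data : List (List String)) : List (String × String) :=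
  pvSieve (data.flatMap (fun line =>
    (PySem.List.slice line (some 1) none).map
      (fun pn => (pn, (PySem.List.pyGet? line 0).getD ""))))

-- ===== PRECONDITION & SPEC =====
-- Pre_ excludes data containing an empty line: there 'line[0]' raises IndexError in both A and B.
def Pre_get_pn_in_monuments (data : List (List String)) : Prop := ∀ line ∈ data, line ≠ []
instance (data : List (List String)) : Decidable (Pre_get_pn_in_monuments data) := by unfold Pre_get_pn_in_monuments; infer_instance
def pvWitness_get_pn_in_monuments : List (List String) := [["m1", "p1", "p2"], ["m2", "p1"]]

def Spec_get_pn_in_monuments (data : List (List String)) (out : List (String × String)) : Prop := out = get_pn_in_monuments_alt data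
instance (data : List (List String)) (out : List (String × String)) : Decidable (Spec_get_pn_in_monuments data out) := by unfold Spec_get_pn_in_monuments; infer_instance

-- ===== CLAIM (what is proved, stated in full; the proofs are below) =====
def Claim_equal_get_pn_in_monuments : Prop := ∀ (data : List (List String)), Dom_get_pn_in_monuments data → Pre_get_pn_in_monuments data → Spec_get_pn_in_monuments data (get_pn_in_monuments data)

-- ===== LEMMAS AND PROOFS =====

-- A's inner loop over the BOM with a fixed monument m is the append-if-new step folded
-- over that line's pair stream.
theorem inner_loop_eq_foldl_pairs (bom : List String) (m : String)
    (acc : List (String × String)) :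
    bom.foldl (fun acc pn => if (pn, m) ∈ acc then acc else acc ++ [(pn, m)]) acc
      = (bom.map (fun pn => (pn, m))).foldl
          (fun acc q => if q ∈ acc then acc else acc ++ [q]) acc := by
  rw [List.foldl_map]

-- Folding the step line by line equals folding it over the flattened pair stream.
theorem foldl_foldl_eq_flatMap (data : List (List String))
    (g : List String → List (String × String)) (a : List (String × String)) :
    data.foldl (fun acc line => (g line).foldl
        (fun acc q => if q ∈ acc then acc else acc ++ [q]) acc) a
      = (data.flatMap g).foldl (fun acc q => if q ∈ acc then acc else acc ++ [q]) a := by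
  induction data generalizing a with
  | nil => rfl
  | cons l ls ih => simp [List.foldl_append, ih]

-- Once a pair is in acc, the fold skips all its occurrences: filtering them out is harmless.
theorem foldl_skip_mem (t : List (String × String)) (h : String × String)
    (acc : List (String × String)) (hmem : h ∈ acc) :
    t.foldl (fun acc q => if q ∈ acc then acc else acc ++ [q]) acc
      = (t.filter (fun p => p ≠ h)).foldl
          (fun acc q => if q ∈ acc then acc else acc ++ [q]) acc := by
  induction t generalizing acc with
  | nil => rfl
  | cons x xs ih =>
      by_cases hx : x = h
      · subst hx
        simp [hmem, ih _ hmem]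
      · have hacc : h ∈ if x ∈ acc then acc else acc ++ [x] := by
          split <;> simp [hmem]
        simp [hx, List.foldl_cons, ih _ hacc]

-- The sieve's unfolding on a nonempty stream, as a plain rewrite rule.
theorem pvSieve_cons (h : String × String) (t : List (String × String)) :
    pvSieve (h :: t) = h :: pvSieve (t.filter (fun p => p ≠ h)) := by
  rw [pvSieve]

-- The append-if-new fold equals acc followed by the sieve of the not-yet-seen pairs
-- (induction on a length bound, since the sieve recurses on a filtered list).
theorem foldl_eq_sieve_aux (n : Nat) : ∀ (xs : List (String × String)), xs.length ≤ n →
    ∀ (acc : List (String × String)),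
    xs.foldl (fun acc q => if q ∈ acc then acc else acc ++ [q]) acc
      = acc ++ pvSieve (xs.filter (fun q => !decide (q ∈ acc))) := by
  induction n with
  | zero =>
      intro xs hxs acc
      have hnil : xs = [] := List.eq_nil_of_length_eq_zero (Nat.le_zero.mp hxs)
      subst hnil
      simp [pvSieve]
  | succ n ih =>
      intro xs hxs acc
      match xs with
      | [] => simp [pvSieve]
      | h :: t =>
        have ht : t.length ≤ n := by simpa using hxs
        have htf : (t.filter (fun p => p ≠ h)).length ≤ n :=
          le_trans (List.length_filter_le _ _) ht
        by_cases hh : h ∈ acc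
        · rw [List.foldl_cons, if_pos hh, foldl_skip_mem t h acc hh, ih _ htf acc]
          simp only [List.filter_filter, List.filter_cons, hh, decide_true,
            Bool.not_true, if_neg (by simp : ¬ (false = true))]
          congr 2
          apply List.filter_congr
          intro p _
          by_cases hp : p = h
          · simp [hp, hh]
          · simp [hp]
        · rw [List.foldl_cons, if_neg hh,
              foldl_skip_mem t h (acc ++ [h]) (by simp), ih _ htf (acc ++ [h])]
          have harg : (t.filter (fun p => p ≠ h)).filter
                (fun q => !decide (q ∈ acc ++ [h]))
              = (t.filter (fun q => !decide (q ∈ acc))).filter (fun p => decide (p ≠ h)) := by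
            simp only [List.filter_filter]
            apply List.filter_congr
            intro p _
            by_cases hp : p = h
            · simp [hp]
            · simp [hp, List.mem_append]
          rw [harg]
          simp only [List.filter_cons, hh, decide_false, Bool.not_false, if_true]
          rw [pvSieve_cons]
          simp

theorem foldl_eq_sieve (xs : List (String × String)) (acc : List (String × String)) :
    xs.foldl (fun acc q => if q ∈ acc then acc else acc ++ [q]) acc
      = acc ++ pvSieve (xs.filter (fun q => !decide (q ∈ acc))) :=
  foldl_eq_sieve_aux xs.length xs le_rfl acc

-- ===== VERDICT (by name: the statement is the Claim_ definition above) =====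
theorem get_pn_in_monuments_spec : Claim_equal_get_pn_in_monuments := by
  intro data _ _
  show get_pn_in_monuments data = get_pn_in_monuments_alt data
  unfold get_pn_in_monuments get_pn_in_monuments_alt
  simp only [inner_loop_eq_foldl_pairs]
  rw [foldl_foldl_eq_flatMap, foldl_eq_sieve]
  simp
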